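-- pv_equiv track=rewrite | github.com/Nghia03092004/nghia03092004.github.io | project_euler_unified/problem_414/solution.py | kaprekar_step
-- ===== SOURCE A (Python) =====
-- def to_digits(n, b, length=5):
--     """Convert number n to base-b digits, padded to given length."""
--     digits = []
--     for _ in range(length):
--         digits.append(n % b)
--         n //= b
--     return digits  # least significant first
--
-- def from_digits(digits, b):
--     """Convert base-b digits (least significant first) to number."""
--     result = 0
--     power = 1
--     for d in digits:
--         result += d * power
--         power *= b
--     return result
--
-- def kaprekar_step(n, b):
--     """Perform one Kaprekar step on n in base b with 5 digits."""
--     digits = to_digits(n, b, 5)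
--     desc = sorted(digits, reverse=True)
--     asc = sorted(digits)
--     D = from_digits(desc[::-1], b)  # desc is most-significant-first, convert properly
--     A = from_digits(asc[::-1], b)
--
--     # Actually, let's be more careful.
--     # desc = sorted digits descending: d[0] >= d[1] >= ... >= d[4]
--     # The number formed: d[0]*b^4 + d[1]*b^3 + d[2]*b^2 + d[3]*b + d[4]
--     D = 0
--     for d in desc:
--         D = D * b + d
--     A = 0
--     for d in asc:
--         A = A * b + d
--
--     return D - A
-- ===== SOURCE B (Python) =====
-- def kaprekar_step(n, b):
--     """Perform one Kaprekar step on n in base b with 5 digits."""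
--     d = []
--     for _ in range(5):
--         n, r = divmod(n, b)
--         d.append(r)
--     # No sorting and no base-b number building: the subtraction of the
--     # descending and ascending arrangements telescopes to
--     #   (max - min) * (b^4 - 1) + (2nd max - 2nd min) * (b^3 - b),
--     # since the middle digit occupies the middle position in both and the
--     # remaining positional weights pair up as b^4-1 and b^3-b.
--     hi1, lo1 = max(d), min(d)
--     d.remove(hi1)
--     d.remove(lo1)
--     hi2, lo2 = max(d), min(d)
--     return (hi1 - lo1) * (b ** 4 - 1) + (hi2 - lo2) * (b ** 3 - b)
-- ===== Notes on version B (the rewrite author's own statement) =====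
-- stated objective: alternative
-- what changed: B eliminates sorting and base-b number building entirely: it selects the two largest and two smallest digits by max/min plus list.remove and returns (hi1-lo1)*(b**4-1) + (hi2-lo2)*(b**3-b), the closed form the descending-minus-ascending subtraction telescopes to (the middle digit cancels and the positional weights pair up).
import Mathlib
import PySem

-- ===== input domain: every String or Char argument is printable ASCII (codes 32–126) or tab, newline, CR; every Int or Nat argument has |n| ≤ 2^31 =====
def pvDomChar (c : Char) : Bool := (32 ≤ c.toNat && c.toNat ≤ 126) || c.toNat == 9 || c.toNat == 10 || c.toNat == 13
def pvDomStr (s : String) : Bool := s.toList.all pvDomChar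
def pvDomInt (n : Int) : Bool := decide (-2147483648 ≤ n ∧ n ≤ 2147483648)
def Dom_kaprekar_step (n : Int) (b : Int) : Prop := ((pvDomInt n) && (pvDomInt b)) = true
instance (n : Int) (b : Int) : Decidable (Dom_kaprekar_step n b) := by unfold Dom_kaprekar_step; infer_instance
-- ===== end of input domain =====

-- One honest line: B does not sort and builds no base-b numbers — it picks the two largest
-- and two smallest digits by max/min-and-remove and combines them with the closed-form
-- weights (b^4-1) and (b^3-b) (objective: alternative, same cost).

-- ===== PORT A =====
-- to_digits(n, b, length): append n % b, n //= b, `length` times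
def to_digits (n : Int) (b : Int) (length : Int) : List Int :=
  ((PySem.List.pyRange 0 length 1).foldl
    (fun (st : List Int × Int) _ =>
      (st.1 ++ [PySem.Int.mod st.2 b], PySem.Int.floordiv st.2 b)) ([], n)).1

-- from_digits(digits, b): result += d * power; power *= b
def from_digits (digits : List Int) (b : Int) : Int :=
  (digits.foldl (fun (st : Int × Int) d => (st.1 + d * st.2, st.2 * b)) (0, 1)).1

def kaprekar_step (n : Int) (b : Int) : Int :=
  let digits := to_digits n b 5
  let desc := PySem.List.sorted digits (fun x => x) true
  let asc := PySem.List.sorted digits (fun x => x) false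
  -- first (dead, later overwritten) computations of D and A; desc[::-1] via slice?
  -- (step -1 is never 0, so slice? is always `some`; getD [] is exact here)
  let _D := from_digits ((PySem.List.slice? desc none none (-1)).getD []) b
  let _A := from_digits ((PySem.List.slice? asc none none (-1)).getD []) b
  let D := desc.foldl (fun D d => D * b + d) 0
  let A := asc.foldl (fun A d => A * b + d) 0
  D - A

-- ===== PORT B =====
def kaprekar_step_alt (n : Int) (b : Int) : Int :=
  -- n, r = divmod(n, b); d.append(r) — five times; divmod? is none only for b = 0,
  -- which Pre_ excludes, so getD (0, 0) is exact here
  let d := ((PySem.List.pyRange 0 5 1).foldl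
    (fun (st : Int × List Int) _ =>
      let qr := (PySem.Int.divmod? st.1 b).getD (0, 0)
      (qr.1, st.2 ++ [qr.2])) (n, [])).2
  -- hi1, lo1 = max(d), min(d): d has 5 elements, so max?/min? are `some` and getD 0 is exact
  let hi1 := (PySem.List.max? d (fun x => x)).getD 0
  let lo1 := (PySem.List.min? d (fun x => x)).getD 0
  -- d.remove(hi1); d.remove(lo1): both values are present, so remove? is `some`, getD exact
  let d1 := (PySem.List.remove? d hi1).getD d
  let d2 := (PySem.List.remove? d1 lo1).getD d1
  let hi2 := (PySem.List.max? d2 (fun x => x)).getD 0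
  let lo2 := (PySem.List.min? d2 (fun x => x)).getD 0
  (hi1 - lo1) * (b ^ 4 - 1) + (hi2 - lo2) * (b ^ 3 - b)

-- ===== PRECONDITION & SPEC =====
-- b = 0 is excluded: n % b / divmod(n, b) raises ZeroDivisionError in both A and B there
def Pre_kaprekar_step (n : Int) (b : Int) : Prop := b ≠ 0
instance (n : Int) (b : Int) : Decidable (Pre_kaprekar_step n b) := by unfold Pre_kaprekar_step; infer_instance
def pvWitness_kaprekar_step : Int × Int := (12345, 10)

def Spec_kaprekar_step (n : Int) (b : Int) (out : Int) : Prop := out = kaprekar_step_alt n b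
instance (n : Int) (b : Int) (out : Int) : Decidable (Spec_kaprekar_step n b out) := by unfold Spec_kaprekar_step; infer_instance

-- ===== CLAIM (what is proved, stated in full; the proofs are below) =====
def Claim_equal_kaprekar_step : Prop := ∀ (n : Int) (b : Int), Dom_kaprekar_step n b → Pre_kaprekar_step n b → Spec_kaprekar_step n b (kaprekar_step n b)

-- ===== LEMMAS AND PROOFS =====

-- max?/min? with the identity key return none only on the empty list
lemma max?_id_none_nil (l : List Int) (h : PySem.List.max? l (fun x => x) = none) : l = [] := by
  cases l with
  | nil => rfl
  | cons a t => rw [PySem.List.max?_id_cons] at h; cases h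

lemma min?_id_none_nil (l : List Int) (h : PySem.List.min? l (fun x => x) = none) : l = [] := by
  cases l with
  | nil => rfl
  | cons a t => rw [PySem.List.min?_id_cons] at h; cases h

-- the descending sort of an Int list is the reverse of its ascending sort
lemma sorted_rev_eq_reverse_sorted (l : List Int) :
    PySem.List.sorted l (fun x => x) true = (PySem.List.sorted l (fun x => x) false).reverse := by
  apply List.Perm.eq_of_pairwise (le := fun a b : Int => b ≤ a)
  · intro a b _ _ h1 h2; exact le_antisymm h2 h1
  · exact PySem.List.sorted_pairwise_rev l (fun x => x)
  · exact (List.pairwise_reverse).mpr (PySem.List.sorted_pairwise l (fun x => x))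
  · exact ((PySem.List.sorted_perm l (fun x => x) true).trans
      ((PySem.List.sorted_perm l (fun x => x) false).symm)).trans
      (List.reverse_perm _).symm

-- the core bridge: on any 5-element digit list, A's sort-and-subtract value equals
-- B's max/min-and-remove value with the closed-form weights
lemma kaprekar_core (l : List Int) (b : Int) (h : l.length = 5) :
    (PySem.List.sorted l (fun x => x) true).foldl (fun D d => D * b + d) 0
      - (PySem.List.sorted l (fun x => x) false).foldl (fun A d => A * b + d) 0
    = ((PySem.List.max? l (fun x => x)).getD 0 - (PySem.List.min? l (fun x => x)).getD 0)
        * (b ^ 4 - 1)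
      + (((PySem.List.max? ((PySem.List.remove?
              ((PySem.List.remove? l ((PySem.List.max? l (fun x => x)).getD 0)).getD l)
              ((PySem.List.min? l (fun x => x)).getD 0)).getD
                ((PySem.List.remove? l ((PySem.List.max? l (fun x => x)).getD 0)).getD l))
            (fun x => x)).getD 0)
         - ((PySem.List.min? ((PySem.List.remove?
              ((PySem.List.remove? l ((PySem.List.max? l (fun x => x)).getD 0)).getD l)
              ((PySem.List.min? l (fun x => x)).getD 0)).getD
                ((PySem.List.remove? l ((PySem.List.max? l (fun x => x)).getD 0)).getD l))
            (fun x => x)).getD 0))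
        * (b ^ 3 - b) := by
  have hlen : (PySem.List.sorted l (fun x => x) false).length = 5 := by
    rw [PySem.List.length_sorted]; exact h
  have hperm : (PySem.List.sorted l (fun x => x) false).Perm l :=
    PySem.List.sorted_perm l (fun x => x) false
  have hpw := PySem.List.sorted_pairwise l (fun x => x)
  rw [sorted_rev_eq_reverse_sorted]
  generalize PySem.List.sorted l (fun x => x) false = s at hlen hperm hpw ⊢
  obtain ⟨a0, a1, a2, a3, a4, rfl⟩ : ∃ a0 a1 a2 a3 a4, s = [a0, a1, a2, a3, a4] := by
    match s, hlen with
    | [a0, a1, a2, a3, a4], _ => exact ⟨_, _, _, _, _, rfl⟩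
  simp at hpw
  obtain ⟨⟨h01, h02, h03, h04⟩, ⟨h12, h13, h14⟩, ⟨h23, h24⟩, h34⟩ := hpw
  -- max of l is a4
  cases hm : PySem.List.max? l (fun x => x) with
  | none => exact absurd (congrArg List.length (max?_id_none_nil l hm)) (by simp [h])
  | some m =>
  have hm4 : m = a4 := by
    have hmem : m ∈ l := PySem.List.max?_mem hm
    have hm_s : m ∈ [a0, a1, a2, a3, a4] := hperm.symm.subset hmem
    have hle : a4 ≤ m := PySem.List.max?_isMax hm a4 (hperm.subset (by simp))
    simp only [List.mem_cons, List.not_mem_nil, or_false] at hm_s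
    rcases hm_s with rfl | rfl | rfl | rfl | rfl <;> omega
  cases hmin : PySem.List.min? l (fun x => x) with
  | none => exact absurd (congrArg List.length (min?_id_none_nil l hmin)) (by simp [h])
  | some m' =>
  have hm0 : m' = a0 := by
    have hmem : m' ∈ l := PySem.List.min?_mem hmin
    have hm_s : m' ∈ [a0, a1, a2, a3, a4] := hperm.symm.subset hmem
    have hle : m' ≤ a0 := PySem.List.min?_isMin hmin a0 (hperm.subset (by simp))
    simp only [List.mem_cons, List.not_mem_nil, or_false] at hm_s
    rcases hm_s with rfl | rfl | rfl | rfl | rfl <;> omega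
  rw [hm4] at hm
  rw [hm0] at hmin
  -- remove max, then min
  have hmem4 : a4 ∈ l := PySem.List.max?_mem hm
  have hrem1 : PySem.List.remove? l a4 = some (l.erase a4) :=
    PySem.List.remove?_eq_some_erase l a4 hmem4
  have hd1perm : (l.erase a4).Perm [a0, a1, a2, a3] := by
    have hsw : ([a0, a1, a2, a3, a4] : List Int).Perm (a4 :: [a0, a1, a2, a3]) := by
      have := List.perm_append_comm (l₁ := [a0, a1, a2, a3]) (l₂ := [a4]); simpa using this
    have := (hperm.symm.trans hsw).erase a4
    simpa [List.erase_cons_head] using this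
  have hmem0 : a0 ∈ l.erase a4 := hd1perm.symm.subset (by simp)
  have hrem2 : PySem.List.remove? (l.erase a4) a0 = some ((l.erase a4).erase a0) :=
    PySem.List.remove?_eq_some_erase _ a0 hmem0
  have hd2perm : ((l.erase a4).erase a0).Perm [a1, a2, a3] := by
    have := hd1perm.erase a0
    simpa [List.erase_cons_head] using this
  -- second max / min
  cases hm2 : PySem.List.max? ((l.erase a4).erase a0) (fun x => x) with
  | none =>
      exact absurd (congrArg List.length (max?_id_none_nil _ hm2))
        (by simp [hd2perm.length_eq])
  | some m2 =>
  have hm23 : m2 = a3 := by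
    have hmem : m2 ∈ [a1, a2, a3] := hd2perm.subset (PySem.List.max?_mem hm2)
    have hle : a3 ≤ m2 := PySem.List.max?_isMax hm2 a3 (hd2perm.symm.subset (by simp))
    simp only [List.mem_cons, List.not_mem_nil, or_false] at hmem
    rcases hmem with rfl | rfl | rfl <;> omega
  cases hmin2 : PySem.List.min? ((l.erase a4).erase a0) (fun x => x) with
  | none =>
      exact absurd (congrArg List.length (min?_id_none_nil _ hmin2))
        (by simp [hd2perm.length_eq])
  | some m2' =>
  have hm21 : m2' = a1 := by
    have hmem : m2' ∈ [a1, a2, a3] := hd2perm.subset (PySem.List.min?_mem hmin2)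
    have hle : m2' ≤ a1 := PySem.List.min?_isMin hmin2 a1 (hd2perm.symm.subset (by simp))
    simp only [List.mem_cons, List.not_mem_nil, or_false] at hmem
    rcases hmem with rfl | rfl | rfl <;> omega
  simp only [Option.getD_some, hm4, hm0]
  rw [hrem1, Option.getD_some, hrem2, Option.getD_some, hm2, hmin2,
    Option.getD_some, Option.getD_some, hm23, hm21]
  simp only [List.foldl_cons, List.foldl_nil,
    show ([a0, a1, a2, a3, a4] : List Int).reverse = [a4, a3, a2, a1, a0] from by simp]
  ring

-- ===== VERDICT (by name: the statement is the Claim_ definition above) =====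
theorem kaprekar_step_spec : Claim_equal_kaprekar_step := by
  intro n b _ hb
  show kaprekar_step n b = kaprekar_step_alt n b
  unfold kaprekar_step kaprekar_step_alt to_digits
  simp only [PySem.Int.divmod?, if_neg hb]
  exact kaprekar_core _ b (by rfl)
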